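-- pv_equiv track=rewrite | github.com/simpsonst/posthack | src/python/apps/remove_external_sender.py | strip_lines
-- ===== SOURCE A (Python) =====
-- def strip_lines(lines, blocks):
--     lim = int((len(lines) + 1) / 2)
--     for i in range(0, lim):
--         for cand in blocks:
--             if i + len(cand) > len(lines):
--                 continue
--             okay = True
--             clen = len(cand)
--             for j in range(0, clen):
--                 if cand[j] != lines[(i + j) * 2]:
--                     okay = False
--                     break
--                 continue
--             if not okay:
--                 continue
--             del lines[2 * i: 2 * (i + clen)]
--             return True
--         continue
--     return False
-- ===== SOURCE B (Python) =====
-- # B: precompute the even-indexed subsequence once, then per block find its first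
-- # occurrence by slice comparison, keeping the minimal start (block-order tiebreak).
-- # Return-value equivalence is what is proved; B performs the same in-place deletion as A.
--
-- def _first_occurrence(evens, cand):
--     c = len(cand)
--     if c == 0:
--         return 0 if evens else None
--     for i in range(0, len(evens) - c + 1):
--         if evens[i] == cand[0] and evens[i:i + c] == cand:
--             return i
--     return None
--
-- def strip_lines(lines, blocks):
--     evens = [lines[i] for i in range(0, len(lines), 2)]
--     best = None
--     for cand in blocks:
--         pos = _first_occurrence(evens, cand)
--         if pos is not None and (best is None or pos < best[0]):
--             best = (pos, len(cand))
--     if best is None: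
--         return False
--     i, clen = best
--     del lines[2 * i: 2 * (i + clen)]
--     return True
-- ===== Notes on version B (the rewrite author's own statement) =====
-- stated objective: faster
-- what changed: B precomputes the even-indexed subsequence once and, for each block, finds its first occurrence in it via a first-element filter plus slice comparison while tracking the minimal start (block-order tiebreak), instead of A's position-outer/block-inner triple-nested loop that re-indexes back into lines.
import Mathlib
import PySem

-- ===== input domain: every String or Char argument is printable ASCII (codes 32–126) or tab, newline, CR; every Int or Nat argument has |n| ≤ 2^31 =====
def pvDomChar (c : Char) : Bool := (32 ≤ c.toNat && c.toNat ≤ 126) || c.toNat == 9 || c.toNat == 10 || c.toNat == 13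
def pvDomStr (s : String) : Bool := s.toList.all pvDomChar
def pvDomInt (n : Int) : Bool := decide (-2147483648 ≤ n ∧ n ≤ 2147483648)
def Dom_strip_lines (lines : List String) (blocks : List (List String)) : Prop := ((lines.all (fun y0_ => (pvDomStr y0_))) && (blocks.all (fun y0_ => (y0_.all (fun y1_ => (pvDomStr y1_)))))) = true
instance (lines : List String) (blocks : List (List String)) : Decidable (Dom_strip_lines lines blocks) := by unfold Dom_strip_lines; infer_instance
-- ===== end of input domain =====

-- B scans each block once against the precomputed even-indexed subsequence instead of A's
-- position-outer/block-inner nested rescans of `lines`; equivalence is about the RETURN value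
-- only (both Pythons also delete the found slice from `lines` in place).

-- ===== PORT A =====
-- inner `for j in range(0, clen)` loop; `none` from pyGet? is Python's IndexError: those inputs
-- are outside Pre_, where this port's value is not claimed (the arm just continues the loop)
def pvJLoop (lines cand : List String) (i : Int) : List Int → Bool
  | [] => true
  | j :: js =>
    match PySem.List.pyGet? cand j, PySem.List.pyGet? lines ((i + j) * 2) with
    | some a, some b => if a ≠ b then false else pvJLoop lines cand i js
    | _, _ => pvJLoop lines cand i js

-- inner `for cand in blocks` loop
def pvBLoop (lines : List String) (i : Int) : List (List String) → Bool
  | [] => false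
  | cand :: rest =>
    if i + (cand.length : Int) > (lines.length : Int) then pvBLoop lines i rest
    else if pvJLoop lines cand i (PySem.List.pyRange 0 (cand.length : Int) 1) then true
    else pvBLoop lines i rest

-- outer `for i in range(0, lim)` loop; `del` mutates and then `return True`
def pvILoop (lines : List String) (blocks : List (List String)) : List Int → Bool
  | [] => false
  | i :: is => if pvBLoop lines i blocks then true else pvILoop lines blocks is

def strip_lines (lines : List String) (blocks : List (List String)) : Bool :=
  -- int((len(lines)+1)/2): float division is exact here (list lengths are far below 2^53),
  -- so this is floor division of nonnegative numbers
  pvILoop lines blocks (PySem.List.pyRange 0 (PySem.Int.floordiv ((lines.length : Int) + 1) 2) 1)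

-- ===== PORT B =====
-- the `for i in range(...)` of _first_occurrence, with its early return
def pvFirstOccAux (evens cand : List String) : List Int → Option Int
  | [] => none
  | i :: is =>
    if PySem.List.pyGetD evens i "" = PySem.List.pyGetD cand 0 "" ∧
        PySem.List.slice evens (some i) (some (i + (cand.length : Int))) = cand then some i
    else pvFirstOccAux evens cand is

def pvFirstOccurrence (evens cand : List String) : Option Int :=
  if cand.length = 0 then (if evens.isEmpty then none else some 0)
  else pvFirstOccAux evens cand
    (PySem.List.pyRange 0 ((evens.length : Int) - (cand.length : Int) + 1) 1)

def strip_lines_alt (lines : List String) (blocks : List (List String)) : Bool :=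
  let evens := (PySem.List.pyRange 0 (lines.length : Int) 2).map
    (fun i => PySem.List.pyGetD lines i "")
  let best := blocks.foldl (fun best cand =>
    match pvFirstOccurrence evens cand, best with
    | none, _ => best
    | some p, none => some (p, (cand.length : Int))
    | some p, some pc => if p < pc.1 then some (p, (cand.length : Int)) else best) none
  -- on success Source B deletes lines[2*i : 2*(i+clen)] in place and returns True
  best.isSome

-- ===== PRECONDITION & SPEC =====
-- the even-indexed lines lines[0], lines[2], …
def pvEvens (lines : List String) : List String :=
  (List.range ((lines.length + 1) / 2)).map (fun k => lines.getD (2 * k) "")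

-- has cand fully matched the even-indexed lines starting at slot k, within bounds?
def pvMatchB (lines cand : List String) (k : Nat) : Bool :=
  decide (k < (lines.length + 1) / 2) && decide (k + cand.length ≤ (lines.length + 1) / 2) &&
    decide (((pvEvens lines).drop k).take cand.length = cand)

-- "crash candidate": cand passes A's length guard at position i, agrees with the even-indexed
-- lines up to their end, yet extends past it (there A's inner loop indexes lines out of range)
def pvCrashB (lines cand : List String) (i : Nat) : Bool :=
  decide (i + cand.length ≤ lines.length) &&
    decide ((lines.length + 1) / 2 < i + cand.length) &&
    decide ((pvEvens lines).drop i <+: cand)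

-- some full match strictly earlier in A's scan order (position first, then block order)
def pvEarlierMatchB (lines : List String) (blocks : List (List String)) (i b : Nat) : Bool :=
  (List.range (i + 1)).any fun i' =>
    (List.range blocks.length).any fun b' =>
      pvMatchB lines (blocks.getD b' []) i' && (decide (i' < i) || decide (b' < b))

-- Pre_ excludes exactly the inputs on which A raises IndexError: some crash candidate is
-- reached in A's scan order before any full match.
def Pre_strip_lines (lines : List String) (blocks : List (List String)) : Prop :=
  ∀ b < blocks.length, ∀ i < (lines.length + 1) / 2,
    pvCrashB lines (blocks.getD b []) i = true → pvEarlierMatchB lines blocks i b = true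
instance (lines : List String) (blocks : List (List String)) : Decidable (Pre_strip_lines lines blocks) := by
  unfold Pre_strip_lines; infer_instance

def pvWitness_strip_lines : List String × List (List String) := (["a", "b", "c"], [["a", "c"]])

def Spec_strip_lines (lines : List String) (blocks : List (List String)) (out : Bool) : Prop := out = strip_lines_alt lines blocks
instance (lines : List String) (blocks : List (List String)) (out : Bool) : Decidable (Spec_strip_lines lines blocks out) := by unfold Spec_strip_lines; infer_instance

-- ===== CLAIM (what is proved, stated in full; the proofs are below) =====
def Claim_equal_strip_lines : Prop := ∀ (lines : List String) (blocks : List (List String)), Dom_strip_lines lines blocks → Pre_strip_lines lines blocks → Spec_strip_lines lines blocks (strip_lines lines blocks)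

-- ===== LEMMAS AND PROOFS =====

-- a full match of `cand` against the even-indexed lines starting at slot k, within bounds
def pvMatch (lines cand : List String) (k : Nat) : Prop :=
  k < (lines.length + 1) / 2 ∧ k + cand.length ≤ (lines.length + 1) / 2 ∧
    ((pvEvens lines).drop k).take cand.length = cand


lemma pvMatchB_iff (lines cand : List String) (k : Nat) :
    pvMatchB lines cand k = true ↔ pvMatch lines cand k := by
  simp [pvMatchB, pvMatch, and_assoc]

lemma pvCrashB_iff (lines cand : List String) (i : Nat) :
    pvCrashB lines cand i = true ↔ i + cand.length ≤ lines.length ∧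
      (lines.length + 1) / 2 < i + cand.length ∧ (pvEvens lines).drop i <+: cand := by
  simp [pvCrashB, and_assoc]

lemma pvEarlierMatchB_iff (lines : List String) (blocks : List (List String)) (i b : Nat) :
    pvEarlierMatchB lines blocks i b = true ↔ ∃ i' ≤ i, ∃ b' < blocks.length,
      pvMatch lines (blocks.getD b' []) i' ∧ (i' < i ∨ b' < b) := by
  simp [pvEarlierMatchB, List.any_eq_true, List.mem_range, pvMatchB_iff]

lemma pvEvens_length (lines : List String) : (pvEvens lines).length = (lines.length + 1) / 2 := by
  simp [pvEvens]

lemma pvEvens_getD (lines : List String) (m : Nat) (hm : m < (lines.length + 1) / 2) :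
    (pvEvens lines).getD m "" = lines.getD (2 * m) "" := by
  simp [pvEvens, List.getD_eq_getElem?_getD, hm]

lemma pvJLoop_eq_all (lines cand : List String) (i : Int) (js : List Int) :
    pvJLoop lines cand i js = js.all (fun j =>
      match PySem.List.pyGet? cand j, PySem.List.pyGet? lines ((i + j) * 2) with
      | some a, some b => a == b
      | _, _ => true) := by
  induction js with
  | nil => rfl
  | cons j js ih =>
    simp only [pvJLoop, List.all_cons, ← ih]
    cases PySem.List.pyGet? cand j <;> cases PySem.List.pyGet? lines ((i + j) * 2) <;> simp
    · rename_i a b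
      by_cases h : a = b <;> simp [h]

lemma pvCheck_eq (lines cand : List String) (k : Nat) (j : Nat) (hj : j < cand.length) :
    ((match PySem.List.pyGet? cand ((j : Nat) : Int),
        PySem.List.pyGet? lines (((k : Int) + ((j : Nat) : Int)) * 2) with
      | some a, some b => a == b
      | _, _ => true) = true) ↔
      (2 * (k + j) < lines.length → lines.getD (2 * (k + j)) "" = cand.getD j "") := by
  have h2 : ((k : Int) + ((j : Nat) : Int)) * 2 = ((2 * (k + j) : Nat) : Int) := by
    push_cast; ring
  rw [h2, PySem.List.pyGet?_natCast, PySem.List.pyGet?_natCast]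
  rw [List.getElem?_eq_getElem hj]
  have hc : cand.getD j "" = cand[j] := List.getD_eq_getElem cand "" hj
  cases hm : lines[2 * (k + j)]? with
  | none =>
    have hge := List.getElem?_eq_none_iff.mp hm
    constructor
    · intro _ hlt; omega
    · intro _; rfl
  | some b =>
    have hlt : 2 * (k + j) < lines.length := by
      by_contra hge
      rw [List.getElem?_eq_none_iff.mpr (by omega)] at hm
      exact absurd hm (by simp)
    have hb : lines.getD (2 * (k + j)) "" = b := by
      rw [List.getD_eq_getElem?_getD, hm]; rfl
    show (cand[j] == b) = true ↔ _
    rw [beq_iff_eq]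
    constructor
    · intro h _; rw [hb, hc, h]
    · intro h; have := h hlt; rw [hc, hb] at this; exact this.symm

lemma pvJLoop_true_iff (lines cand : List String) (k : Nat) :
    pvJLoop lines cand (k : Int) (PySem.List.pyRange 0 (cand.length : Int) 1) = true ↔
      ∀ j < cand.length, 2 * (k + j) < lines.length →
        lines.getD (2 * (k + j)) "" = cand.getD j "" := by
  rw [pvJLoop_eq_all, PySem.List.pyRange_one]
  simp only [List.all_map, List.all_eq_true, List.mem_range, Int.sub_zero, Int.toNat_natCast,
    Function.comp, zero_add]
  constructor
  · intro h j hj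
    have := h j hj
    rw [pvCheck_eq lines cand k j hj] at this
    exact this
  · intro h j hj
    rw [pvCheck_eq lines cand k j hj]
    exact h j hj

lemma pvBLoop_true_iff (lines : List String) (i : Int) (bs : List (List String)) :
    pvBLoop lines i bs = true ↔ ∃ cand ∈ bs, ¬ (i + (cand.length : Int) > (lines.length : Int)) ∧
      pvJLoop lines cand i (PySem.List.pyRange 0 (cand.length : Int) 1) = true := by
  induction bs with
  | nil => simp [pvBLoop]
  | cons c rest ih =>
    simp only [pvBLoop]
    split_ifs with h1 h2
    · rw [ih]
      constructor
      · rintro ⟨c', hc', hg, hj⟩; exact ⟨c', List.mem_cons_of_mem _ hc', hg, hj⟩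
      · rintro ⟨c', hc', hg, hj⟩
        rcases List.mem_cons.mp hc' with rfl | hc'
        · exact absurd h1 hg
        · exact ⟨c', hc', hg, hj⟩
    · simp only [true_iff]; exact ⟨c, List.mem_cons_self, h1, h2⟩
    · rw [ih]
      constructor
      · rintro ⟨c', hc', hg, hj⟩; exact ⟨c', List.mem_cons_of_mem _ hc', hg, hj⟩
      · rintro ⟨c', hc', hg, hj⟩
        rcases List.mem_cons.mp hc' with rfl | hc'
        · exact absurd hj h2
        · exact ⟨c', hc', hg, hj⟩

lemma pvILoop_true_iff (lines : List String) (blocks : List (List String)) (is : List Int) :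
    pvILoop lines blocks is = true ↔ ∃ i ∈ is, pvBLoop lines i blocks = true := by
  induction is with
  | nil => simp [pvILoop]
  | cons i is ih =>
    simp only [pvILoop]
    split_ifs with h
    · simp [h]
    · simp [ih, h]

lemma pvSlice_iff (lines cand : List String) (k : Nat)
    (hkc : k + cand.length ≤ (lines.length + 1) / 2) :
    ((pvEvens lines).drop k).take cand.length = cand ↔
      ∀ j < cand.length, lines.getD (2 * (k + j)) "" = cand.getD j "" := by
  have hE := pvEvens_length lines
  constructor
  · intro heq j hj
    have h1 := congrArg (fun l => l[j]?) heq
    simp only [List.getElem?_take, hj, if_pos, List.getElem?_drop] at h1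
    have h2 : (pvEvens lines).getD (k + j) "" = cand.getD j "" := by
      rw [List.getD_eq_getElem?_getD, List.getD_eq_getElem?_getD, h1]
    rw [← h2, pvEvens_getD lines (k + j) (by omega)]
  · intro h
    apply List.ext_getElem?
    intro j
    by_cases hj : j < cand.length
    · simp only [List.getElem?_take, hj, if_pos, List.getElem?_drop]
      rw [List.getElem?_eq_getElem (by omega : k + j < (pvEvens lines).length),
        List.getElem?_eq_getElem hj]
      have h2 : (pvEvens lines).getD (k + j) "" = cand.getD j "" := by
        rw [pvEvens_getD lines (k + j) (by omega)]
        exact h j hj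
      rw [List.getD_eq_getElem _ _ (by omega), List.getD_eq_getElem _ _ hj] at h2
      rw [h2]
    · simp only [List.getElem?_take, hj, if_neg, not_false_iff]
      rw [List.getElem?_eq_none_iff.mpr (by omega)]

-- if the conditional pointwise agreement holds but cand sticks out past the last even index,
-- then the even tail is a prefix of cand (a crash candidate of A)
lemma pvPrefix_of_pointwise (lines cand : List String) (k : Nat)
    (hk : k < (lines.length + 1) / 2) (hout : (lines.length + 1) / 2 < k + cand.length)
    (h : ∀ j < cand.length, 2 * (k + j) < lines.length →
      lines.getD (2 * (k + j)) "" = cand.getD j "") :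
    (pvEvens lines).drop k <+: cand := by
  have hE := pvEvens_length lines
  rw [List.prefix_iff_eq_take]
  apply List.ext_getElem?
  intro j
  have hlen : ((pvEvens lines).drop k).length = (lines.length + 1) / 2 - k := by
    simp [List.length_drop, hE]
  rw [hlen]
  by_cases hj : j < (lines.length + 1) / 2 - k
  · rw [List.getElem?_drop, List.getElem?_take, if_pos hj]
    have hjc : j < cand.length := by omega
    rw [List.getElem?_eq_getElem (by omega : k + j < (pvEvens lines).length),
      List.getElem?_eq_getElem hjc]
    have h2 : (pvEvens lines).getD (k + j) "" = cand.getD j "" := by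
      rw [pvEvens_getD lines (k + j) (by omega)]
      exact h j hjc (by omega)
    rw [List.getD_eq_getElem _ _ (by omega), List.getD_eq_getElem _ _ hjc] at h2
    rw [h2]
  · rw [List.getElem?_drop, List.getElem?_take, if_neg hj,
      List.getElem?_eq_none_iff.mpr (by omega : (pvEvens lines).length ≤ k + j)]

lemma strip_lines_true_iff (lines : List String) (blocks : List (List String))
    (hpre : Pre_strip_lines lines blocks) :
    strip_lines lines blocks = true ↔ ∃ cand ∈ blocks, ∃ k, pvMatch lines cand k := by
  unfold strip_lines
  have hlim : PySem.Int.floordiv ((lines.length : Int) + 1) 2 =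
      (((lines.length + 1) / 2 : Nat) : Int) := by
    have := PySem.Int.floordiv_natCast (lines.length + 1) 2
    push_cast at this ⊢
    exact this
  rw [hlim, pvILoop_true_iff]
  constructor
  · rintro ⟨i, hi, hb⟩
    obtain ⟨h0, hlt⟩ := PySem.List.mem_pyRange_one.mp hi
    obtain ⟨k, rfl⟩ : ∃ k : Nat, i = (k : Int) := ⟨i.toNat, (Int.toNat_of_nonneg h0).symm⟩
    obtain ⟨cand, hc, hg, hj⟩ := (pvBLoop_true_iff lines _ blocks).mp hb
    rw [pvJLoop_true_iff] at hj
    have hk : k < (lines.length + 1) / 2 := by exact_mod_cast hlt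
    have hg' : k + cand.length ≤ lines.length := by omega
    by_cases hkc : k + cand.length ≤ (lines.length + 1) / 2
    · exact ⟨cand, hc, k, hk, hkc,
        (pvSlice_iff lines cand k hkc).mpr (fun j hj' => hj j hj' (by omega))⟩
    · -- crash candidate: Pre_ supplies a full match elsewhere
      obtain ⟨b, hbl, hbe⟩ := List.getElem_of_mem hc
      have hget : blocks.getD b [] = cand := by
        rw [List.getD_eq_getElem _ _ hbl]; exact hbe
      have hcrash : pvCrashB lines (blocks.getD b []) k = true := by
        rw [hget, pvCrashB_iff]
        exact ⟨by omega, by omega, pvPrefix_of_pointwise lines cand k hk (by omega) hj⟩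
      obtain ⟨i', -, b', hbl', hm, -⟩ :=
        (pvEarlierMatchB_iff lines blocks k b).mp (hpre b hbl k hk hcrash)
      refine ⟨blocks.getD b' [], ?_, i', hm⟩
      rw [List.getD_eq_getElem _ _ hbl']
      exact List.getElem_mem _
  · rintro ⟨cand, hc, k, hk, hkc, hslice⟩
    refine ⟨(k : Int), PySem.List.mem_pyRange_one.mpr ⟨by omega, by exact_mod_cast hk⟩, ?_⟩
    rw [pvBLoop_true_iff]
    refine ⟨cand, hc, by omega, ?_⟩
    rw [pvJLoop_true_iff]
    intro j hj' _
    exact (pvSlice_iff lines cand k hkc).mp hslice j hj'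

lemma evensB_eq (lines : List String) :
    (PySem.List.pyRange 0 (lines.length : Int) 2).map (fun i => PySem.List.pyGetD lines i "") =
      pvEvens lines := by
  rw [PySem.List.pyRange_of_pos 0 (lines.length : Int) (by omega : (0 : Int) < 2), List.map_map]
  have hcount : (if (0 : Int) < (lines.length : Int) then
      (((lines.length : Int) - 0 + 2 - 1) / 2).toNat else 0) = (lines.length + 1) / 2 := by
    by_cases h : 0 < lines.length
    · rw [if_pos (by exact_mod_cast h)]
      have h1 : ((lines.length : Int) - 0 + 2 - 1) = ((lines.length + 1 : Nat) : Int) := by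
        push_cast; ring
      rw [h1]
      rw [show ((lines.length + 1 : Nat) : Int) / 2 = (((lines.length + 1) / 2 : Nat) : Int) from
        Nat.ToInt.div_congr rfl rfl]
      exact Int.toNat_natCast _
    · rw [if_neg (by exact_mod_cast h)]
      omega
  rw [hcount]
  unfold pvEvens
  apply List.map_congr_left
  intro k hk
  have h1 : (0 : Int) + 2 * (k : Int) = ((2 * k : Nat) : Int) := by push_cast; ring
  simp only [Function.comp_apply, h1, PySem.List.pyGetD_natCast]

lemma pvFirstOccAux_isSome_iff (evens cand : List String) (is : List Int) :
    (pvFirstOccAux evens cand is).isSome = true ↔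
      ∃ i ∈ is, PySem.List.pyGetD evens i "" = PySem.List.pyGetD cand 0 "" ∧
        PySem.List.slice evens (some i) (some (i + (cand.length : Int))) = cand := by
  induction is with
  | nil => simp [pvFirstOccAux]
  | cons i is ih =>
    simp only [pvFirstOccAux]
    split_ifs with h
    · simp [h]
    · simp [ih, h]

lemma pvFirstOccurrence_isSome_iff (lines cand : List String) :
    (pvFirstOccurrence (pvEvens lines) cand).isSome = true ↔ ∃ k, pvMatch lines cand k := by
  have hE := pvEvens_length lines
  unfold pvFirstOccurrence
  by_cases hz : cand.length = 0
  · have hcand : cand = [] := List.length_eq_zero_iff.mp hz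
    rw [if_pos hz]
    by_cases he : (pvEvens lines).isEmpty
    · have h0 : (lines.length + 1) / 2 = 0 := by
        rw [← hE]; exact List.length_eq_zero_iff.mpr (List.isEmpty_iff.mp he)
      rw [if_pos he]
      simp only [Option.isSome_none, Bool.false_eq_true, false_iff]
      rintro ⟨k, hk, -, -⟩
      omega
    · have h0 : 0 < (lines.length + 1) / 2 := by
        rw [← hE]
        exact List.length_pos_iff.mpr (by simpa using he)
      rw [if_neg he]
      simp only [Option.isSome_some, true_iff]
      exact ⟨0, h0, by omega, by simp [hcand]⟩
  · rw [if_neg hz, pvFirstOccAux_isSome_iff]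
    constructor
    · rintro ⟨i, hi, hs⟩
      obtain ⟨h0, hlt⟩ := PySem.List.mem_pyRange_one.mp hi
      obtain ⟨k, rfl⟩ : ∃ k : Nat, i = (k : Int) := ⟨i.toNat, (Int.toNat_of_nonneg h0).symm⟩
      rw [PySem.List.slice_natCast_add] at hs
      replace hs := hs.2
      have hkc : k + cand.length ≤ (lines.length + 1) / 2 := by
        rw [hE] at hlt
        omega
      exact ⟨k, by omega, hkc, hs⟩
    · rintro ⟨k, hk, hkc, hs⟩
      refine ⟨(k : Int), PySem.List.mem_pyRange_one.mpr ⟨by omega, ?_⟩, ?_⟩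
      · rw [hE]
        push_cast
        omega
      · rw [PySem.List.slice_natCast_add]
        refine ⟨?_, hs⟩
        have h0 := congrArg (fun l => l.getD 0 "") hs
        simp only [List.getD_eq_getElem?_getD, List.getElem?_take, List.getElem?_drop,
          (by omega : 0 < cand.length), if_pos, Nat.add_zero] at h0
        rw [PySem.List.pyGetD_natCast, (by norm_num : (0 : Int) = ((0 : Nat) : Int)),
          PySem.List.pyGetD_natCast, List.getD_eq_getElem?_getD, List.getD_eq_getElem?_getD]
        exact h0

lemma pvFoldl_best_isSome (evens : List String) (blocks : List (List String))
    (acc : Option (Int × Int)) :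
    (blocks.foldl (fun best cand =>
      match pvFirstOccurrence evens cand, best with
      | none, _ => best
      | some p, none => some (p, (cand.length : Int))
      | some p, some pc => if p < pc.1 then some (p, (cand.length : Int)) else best) acc).isSome =
      (acc.isSome || blocks.any (fun c => (pvFirstOccurrence evens c).isSome)) := by
  induction blocks generalizing acc with
  | nil => simp
  | cons c cs ih =>
    rw [List.foldl_cons, ih, List.any_cons]
    cases hc : pvFirstOccurrence evens c with
    | none => simp
    | some p =>
      cases acc with
      | none => simp
      | some pc =>
        by_cases hlt : p < pc.1 <;> simp [hlt]

lemma strip_lines_alt_true_iff (lines : List String) (blocks : List (List String)) :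
    strip_lines_alt lines blocks = true ↔ ∃ cand ∈ blocks, ∃ k, pvMatch lines cand k := by
  unfold strip_lines_alt
  rw [evensB_eq, pvFoldl_best_isSome]
  simp only [Option.isSome_none, Bool.false_or, List.any_eq_true]
  constructor
  · rintro ⟨cand, hc, hs⟩
    exact ⟨cand, hc, (pvFirstOccurrence_isSome_iff lines cand).mp hs⟩
  · rintro ⟨cand, hc, hm⟩
    exact ⟨cand, hc, (pvFirstOccurrence_isSome_iff lines cand).mpr hm⟩

-- ===== VERDICT (by name: the statement is the Claim_ definition above) =====
theorem strip_lines_spec : Claim_equal_strip_lines := by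
  intro lines blocks _ hpre
  unfold Spec_strip_lines
  rw [Bool.eq_iff_iff, strip_lines_true_iff lines blocks hpre, strip_lines_alt_true_iff]
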